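-- pv_equiv track=rewrite | github.com/BestKate/kate-s-python-files | array.py | monotone
-- ===== SOURCE A (Python) =====
-- def monotone(arr: list) -> int:
--     """maximum length of monotonous section
--     :param: arr: list
--     :return: int"""
--     m = 0
--     k = 0
--     for i in range(len(arr) - 2):
--         if (arr[i] >= arr[i + 1]) and (arr[i + 1] >= arr[i + 2]):
--             m += 1
--         if (arr[i] <= arr[i + 1]) and (arr[i + 1] <= arr[i + 2]):
--             k += 1
--     return k + 2 if k > m else m + 2
-- ===== SOURCE B (Python) =====
-- def _triples(arr, cmp):
--     """sum of max(L-2, 0) over maximal cmp-runs of arr = number of cmp-triples"""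
--     total = 0
--     run = 1
--     for x, y in zip(arr, arr[1:]):
--         if cmp(x, y):
--             run += 1
--         else:
--             total += max(run - 2, 0)
--             run = 1
--     return total + max(run - 2, 0)
--
-- def monotone(arr: list) -> int:
--     """maximum length of monotonous section
--     :param: arr: list
--     :return: int"""
--     m = _triples(arr, lambda a, b: a >= b)
--     k = _triples(arr, lambda a, b: a <= b)
--     return max(m, k) + 2
-- ===== Notes on version B (the rewrite author's own statement) =====
-- stated objective: alternative
-- what changed: Instead of testing every length-3 window by index, B decomposes the array greedily into maximal monotone runs (tracking the current run length while scanning adjacent pairs) and sums max(run_len-2,0) over runs, returning max(m,k)+2.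
import Mathlib
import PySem

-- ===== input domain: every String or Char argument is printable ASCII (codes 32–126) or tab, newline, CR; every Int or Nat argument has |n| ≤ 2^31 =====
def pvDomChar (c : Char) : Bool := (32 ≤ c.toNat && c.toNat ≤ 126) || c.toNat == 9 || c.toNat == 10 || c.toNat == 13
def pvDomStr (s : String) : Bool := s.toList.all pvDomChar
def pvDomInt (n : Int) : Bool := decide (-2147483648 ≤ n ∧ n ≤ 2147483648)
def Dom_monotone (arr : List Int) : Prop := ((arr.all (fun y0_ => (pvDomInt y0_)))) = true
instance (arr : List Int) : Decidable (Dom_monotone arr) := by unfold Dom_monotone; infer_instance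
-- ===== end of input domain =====

-- B replaces A's per-window index loop by a greedy decomposition into maximal monotone
-- runs, summing max(run_len-2,0) over runs (alternative algorithm, same cost).


-- ===== PORT A =====
-- arr[i] is always in range for i in range(len(arr)-2), so pyGetD with default 0 is exact here.
def monotone (arr : List Int) : Int :=
  let r := (PySem.List.pyRange 0 ((arr.length : Int) - 2) 1).foldl
    (fun (s : Int × Int) i =>
      let s1 := if PySem.List.pyGetD arr i 0 ≥ PySem.List.pyGetD arr (i+1) 0 ∧
                   PySem.List.pyGetD arr (i+1) 0 ≥ PySem.List.pyGetD arr (i+2) 0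
                then (s.1 + 1, s.2) else s
      if PySem.List.pyGetD arr i 0 ≤ PySem.List.pyGetD arr (i+1) 0 ∧
         PySem.List.pyGetD arr (i+1) 0 ≤ PySem.List.pyGetD arr (i+2) 0
      then (s1.1, s1.2 + 1) else s1) (0, 0)
  if r.2 > r.1 then r.2 + 2 else r.1 + 2

-- ===== PORT B =====
-- one step of B's scan: extend the current run, or close it and add max(run-2,0)
def monoStep (q : Int → Int → Bool) (s : Int × Int) (p : Int × Int) : Int × Int :=
  if q p.1 p.2 then (s.1, s.2 + 1) else (s.1 + max (s.2 - 2) 0, 1)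

-- B's _triples: fold over adjacent pairs with state (total, current run length)
def triplesB (q : Int → Int → Bool) (arr : List Int) : Int :=
  let s := (arr.zip arr.tail).foldl (monoStep q) (0, 1)
  s.1 + max (s.2 - 2) 0

def monotone_alt (arr : List Int) : Int :=
  let m := triplesB (fun a b => decide (a ≥ b)) arr
  let k := triplesB (fun a b => decide (a ≤ b)) arr
  max m k + 2

-- ===== PRECONDITION & SPEC =====
def Spec_monotone (arr : List Int) (out : Int) : Prop := out = monotone_alt arr
instance (arr : List Int) (out : Int) : Decidable (Spec_monotone arr out) := by unfold Spec_monotone; infer_instance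

-- ===== CLAIM (what is proved, stated in full; the proofs are below) =====
def Claim_equal_monotone : Prop := ∀ (arr : List Int), Dom_monotone arr → Spec_monotone arr (monotone arr)

-- ===== LEMMAS AND PROOFS =====

-- count of monotone triples, recursing down the list
def tripleCnt (p : Int → Int → Int → Bool) : List Int → Nat
  | a :: b :: c :: t => (if p a b c then 1 else 0) + tripleCnt p (b :: c :: t)
  | _ => 0

-- A's fold of the pair of counters splits into two independent countP's
lemma foldA_split (arr : List Int) (L : List Int) (m0 k0 : Int) :
    L.foldl
      (fun (s : Int × Int) i =>
        let s1 := if PySem.List.pyGetD arr i 0 ≥ PySem.List.pyGetD arr (i+1) 0 ∧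
                     PySem.List.pyGetD arr (i+1) 0 ≥ PySem.List.pyGetD arr (i+2) 0
                  then (s.1 + 1, s.2) else s
        if PySem.List.pyGetD arr i 0 ≤ PySem.List.pyGetD arr (i+1) 0 ∧
           PySem.List.pyGetD arr (i+1) 0 ≤ PySem.List.pyGetD arr (i+2) 0
        then (s1.1, s1.2 + 1) else s1) (m0, k0)
    = (m0 + L.countP (fun i => decide (PySem.List.pyGetD arr i 0 ≥ PySem.List.pyGetD arr (i+1) 0 ∧
                     PySem.List.pyGetD arr (i+1) 0 ≥ PySem.List.pyGetD arr (i+2) 0)),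
       k0 + L.countP (fun i => decide (PySem.List.pyGetD arr i 0 ≤ PySem.List.pyGetD arr (i+1) 0 ∧
                     PySem.List.pyGetD arr (i+1) 0 ≤ PySem.List.pyGetD arr (i+2) 0))) := by
  induction L generalizing m0 k0 with
  | nil => simp
  | cons x xs ih =>
    simp only [List.foldl_cons, List.countP_cons]
    rw [ih]
    clear ih
    split_ifs <;> simp only [decide_eq_true_eq, Prod.mk.injEq] at * <;> omega

-- shifting an index loop one step down the list
lemma countP_shift (x : Int) (rest : List Int) (n : Nat) (p : Int → Int → Int → Bool) :
    (PySem.List.pyRange 1 ((n : Int) + 1) 1).countP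
      (fun i => p (PySem.List.pyGetD (x :: rest) i 0) (PySem.List.pyGetD (x :: rest) (i+1) 0)
                  (PySem.List.pyGetD (x :: rest) (i+2) 0))
    = (PySem.List.pyRange 0 (n : Int) 1).countP
      (fun i => p (PySem.List.pyGetD rest i 0) (PySem.List.pyGetD rest (i+1) 0)
                  (PySem.List.pyGetD rest (i+2) 0)) := by
  rw [PySem.List.pyRange_one, PySem.List.pyRange_one]
  simp only [List.countP_map]
  have hn : ((n : Int) + 1 - 1).toNat = n := by omega
  have hn2 : ((n : Int) - 0).toNat = n := by omega
  rw [hn, hn2]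
  apply List.countP_congr
  intro k hk
  have shiftI : ∀ (j : Int), 0 ≤ j →
      PySem.List.pyGetD (x :: rest) (j + 1) 0 = PySem.List.pyGetD rest j 0 := by
    intro j hj
    lift j to Nat using hj
    have hc : (j : Int) + 1 = ((j + 1 : Nat) : Int) := by push_cast; ring
    rw [hc, PySem.List.pyGetD_natCast, PySem.List.pyGetD_natCast, List.getD_cons_succ]
  simp only [Function.comp_apply]
  have a1 : (1 : Int) + (k : Int) = (k : Int) + 1 := by ring
  rw [a1]
  have a3 : ((k : Int) + 1) + 2 = ((k : Int) + 2) + 1 := by ring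
  rw [a3]
  have b1 : (0 : Int) + (k : Int) = (k : Int) := by ring
  rw [b1]
  rw [shiftI k (by omega), shiftI ((k : Int) + 1) (by omega), shiftI ((k : Int) + 2) (by omega)]

-- the index-loop count equals the structural triple count
lemma countP_eq_tripleCnt (arr : List Int) (p : Int → Int → Int → Bool) :
    (PySem.List.pyRange 0 ((arr.length : Int) - 2) 1).countP
      (fun i => p (PySem.List.pyGetD arr i 0) (PySem.List.pyGetD arr (i+1) 0)
                  (PySem.List.pyGetD arr (i+2) 0))
    = tripleCnt p arr := by
  induction arr using tripleCnt.induct with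
  | case1 a b c t ih =>
    have hlen : ((a :: b :: c :: t).length : Int) - 2 = ((t.length : Nat) : Int) + 1 := by
      simp; ring
    rw [hlen, PySem.List.pyRange_one_cons (by positivity), List.countP_cons]
    have h0 : PySem.List.pyGetD (a :: b :: c :: t) 0 0 = a := by
      simp [pysem, PySem.List.pyGetD, PySem.List.pyGet?, PySem.List.pyIdx?]
      rw [if_pos (by omega)]
      simp
    have h1 : PySem.List.pyGetD (a :: b :: c :: t) (0+1) 0 = b := by
      simp [pysem, PySem.List.pyGetD, PySem.List.pyGet?, PySem.List.pyIdx?]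
      rw [if_pos (by omega)]
      simp
    have h2 : PySem.List.pyGetD (a :: b :: c :: t) (0+2) 0 = c := by
      simp [pysem, PySem.List.pyGetD, PySem.List.pyGet?, PySem.List.pyIdx?]
      rw [if_pos (by omega)]
      simp
    rw [h0, h1, h2]
    rw [show ((0:Int)+1) = 1 by norm_num]
    rw [countP_shift a (b :: c :: t) t.length p]
    have hlen2 : ((b :: c :: t).length : Int) - 2 = ((t.length : Nat) : Int) := by
      simp; ring
    rw [hlen2] at ih
    rw [ih, tripleCnt]
    split_ifs <;> omega
  | case2 l h =>
    have hle : ((l.length : Int) - 2) ≤ 0 := by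
      rcases l with _ | ⟨a, _ | ⟨b, _ | ⟨c, t⟩⟩⟩
      · simp
      · simp
      · simp
      · exact ((h a b c t) rfl).elim
    rw [PySem.List.pyRange_one_eq_nil (by omega)]
    rcases l with _ | ⟨a, _ | ⟨b, _ | ⟨c, t⟩⟩⟩
    · simp [tripleCnt]
    · simp [tripleCnt]
    · simp [tripleCnt]
    · exact ((h a b c t) rfl).elim

-- invariant of B's run scan: with current run of length r ending at prev (r ≥ 1, and
-- r ≥ 2 exactly when the virtual predecessor a continues the run), the final
-- total-plus-last-run value counts every remaining monotone triple
lemma foldB_eq (q : Int → Int → Bool) (l : List Int) (a prev : Int) (t r : Int)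
    (hr : 1 ≤ r) (hq : decide (2 ≤ r) = q a prev) :
    (let s := ((prev :: l).zip l).foldl (monoStep q) (t, r); s.1 + max (s.2 - 2) 0)
    = t + max (r - 2) 0 + (tripleCnt (fun x y z => q x y && q y z) (a :: prev :: l) : Int) := by
  induction l generalizing a prev t r with
  | nil => simp [tripleCnt]
  | cons y l' ih =>
    simp only [List.zip_cons_cons, List.foldl_cons]
    rw [tripleCnt]
    by_cases hqy : q prev y = true
    · rw [show monoStep q (t, r) (prev, y) = (t, r + 1) by simp [monoStep, hqy]]
      rw [ih prev y t (r + 1) (by omega) (by rw [hqy]; simp; omega)]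
      have hp : (q a prev && q prev y) = decide (2 ≤ r) := by rw [hqy, ← hq]; simp
      rw [hp]
      by_cases h2 : 2 ≤ r
      · rw [if_pos (by simp [h2])]; push_cast; omega
      · rw [if_neg (by simp [h2])]; push_cast; omega
    · rw [show monoStep q (t, r) (prev, y) = (t + max (r - 2) 0, 1) by
        simp [monoStep, hqy]]
      rw [ih prev y (t + max (r - 2) 0) 1 (by omega) (by simp [hqy])]
      have hp : (q a prev && q prev y) = false := by simp [hqy]
      rw [hp]
      simp

-- B's run scan counts the structural triple count
lemma triplesB_eq (q : Int → Int → Bool) (arr : List Int) :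
    triplesB q arr = (tripleCnt (fun x y z => q x y && q y z) arr : Int) := by
  match arr with
  | [] => simp [triplesB, tripleCnt]
  | [a] => simp [triplesB, tripleCnt]
  | a :: b :: l =>
    unfold triplesB
    simp only [List.tail_cons, List.zip_cons_cons, List.foldl_cons]
    by_cases hab : q a b = true
    · rw [show monoStep q (0, 1) (a, b) = (0, 2) by simp [monoStep, hab]]
      rw [foldB_eq q l a b 0 2 (by omega) (by simp [hab])]
      simp
    · rw [show monoStep q (0, 1) (a, b) = (0 + max ((1:Int) - 2) 0, 1) by
        simp [monoStep, hab]]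
      rw [foldB_eq q l a b (0 + max ((1:Int) - 2) 0) 1 (by omega) (by simp [hab])]
      simp

-- ===== VERDICT (by name: the statement is the Claim_ definition above) =====
theorem monotone_spec : Claim_equal_monotone := by
  intro arr _
  show monotone arr = monotone_alt arr
  unfold monotone monotone_alt
  have hm := triplesB_eq (fun x y => decide (x ≥ y)) arr
  have hk := triplesB_eq (fun x y => decide (x ≤ y)) arr
  have hg : (fun x y z : Int => decide (x ≥ y) && decide (y ≥ z))
      = (fun x y z : Int => decide (x ≥ y ∧ y ≥ z)) := by
    funext x y z; simp
  have hl : (fun x y z : Int => decide (x ≤ y) && decide (y ≤ z))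
      = (fun x y z : Int => decide (x ≤ y ∧ y ≤ z)) := by
    funext x y z; simp
  rw [hg] at hm
  rw [hl] at hk
  have hA := countP_eq_tripleCnt arr (fun x y z => decide (x ≥ y ∧ y ≥ z))
  have hB := countP_eq_tripleCnt arr (fun x y z => decide (x ≤ y ∧ y ≤ z))
  beta_reduce at hA hB
  simp only [foldA_split, hA, hB, hm, hk]
  rw [max_def]
  split_ifs <;> omega
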